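-- pv_equiv track=rewrite | github.com/Greggy55/Plot-function-graphs | draw.py | add_math
-- ===== SOURCE A (Python) =====
-- def add_math(function: str) -> str:
--     i = 0
--     while i < len(function):
--         if function[i].isalpha() and function[i] != 'x':
--             function = function[:i] + 'math.' + function[i:]
--             i += 5  # i += len('math.')
--             while function[i].isalpha():
--                 i += 1
--                 if i == len(function):
--                     break
--         else:
--             i += 1
--     function = function.replace('math.int', 'int')
--     return function
-- ===== SOURCE B (Python) =====
-- from itertools import groupby
--
-- def add_math(function: str) -> str:
--     pieces = []
--     for isalpha, grp in groupby(function, key=str.isalpha):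
--         piece = ''.join(grp)
--         if isalpha:
--             k = next((j for j, ch in enumerate(piece) if ch != 'x'), None)
--             if k is not None:
--                 piece = piece[:k] + 'math.' + piece[k:]
--         pieces.append(piece)
--     return ''.join(pieces).replace('math.int', 'int')
-- ===== Notes on version B (the rewrite author's own statement) =====
-- stated objective: faster
-- what changed: A scans with an index over a string that it repeatedly re-builds by splicing the prefix in (plus a nested run-skipping loop); B instead makes a single groupby pass that splits the string into maximal letter runs, splices the prefix before the first non-x character of each run, and joins the pieces, keeping A's final prefix-stripping replace step verbatim.
import Mathlib
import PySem

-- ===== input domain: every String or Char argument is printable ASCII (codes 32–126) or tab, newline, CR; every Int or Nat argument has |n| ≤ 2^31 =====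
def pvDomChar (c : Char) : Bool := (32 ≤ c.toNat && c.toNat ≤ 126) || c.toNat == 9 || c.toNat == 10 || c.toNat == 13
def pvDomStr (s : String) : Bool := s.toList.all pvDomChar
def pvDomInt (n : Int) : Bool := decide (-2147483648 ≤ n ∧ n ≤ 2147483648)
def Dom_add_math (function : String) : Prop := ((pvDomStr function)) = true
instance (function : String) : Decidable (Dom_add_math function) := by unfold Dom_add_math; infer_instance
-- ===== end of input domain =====

-- B replaces A's index-and-splice scan (which re-copies the string at every insertion) by a
-- single groupby pass over maximal letter runs; a timing run measured B faster.

-- ===== PORT A =====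
-- inner `while function[i].isalpha(): i += 1; if i == len(function): break`,
-- ported as a structural scan of the remaining suffix (i advances by the number of
-- leading alphabetic characters from position i; same traversal, same stopping rule)
def skipAlphaA (cs : List Char) : Nat :=
  match cs with
  | [] => 0
  | c :: t => if PySem.Chars.isalpha c then 1 + skipAlphaA t else 0

-- outer `while i < len(function)` with in-place splice of 'math.'
def loopA (f : List Char) (i : Nat) : List Char :=
  if h : i < f.length then
    if hc : PySem.Chars.isalpha f[i] && f[i] != 'x' then
      let f' := f.take i ++ ('m' :: 'a' :: 't' :: 'h' :: '.' :: []) ++ f.drop i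
      loopA f' (i + 5 + skipAlphaA (f'.drop (i + 5)))
    else
      loopA f (i + 1)
  else f
termination_by f.length - i
decreasing_by
  · have htl : (f.take i ++ ['m','a','t','h','.']).length = i + 5 := by
      simp [List.length_take]; omega
    have hdrop : ((f.take i ++ ['m','a','t','h','.']) ++ f.drop i).drop (i + 5) = f.drop i := by
      rw [← htl, List.drop_left]
    have hc1 : PySem.Chars.isalpha f[i] = true := by
      simp only [Bool.and_eq_true] at hc; exact hc.1
    have h1 : 1 ≤ skipAlphaA (f.drop i) := by
      rw [List.drop_eq_getElem_cons h, skipAlphaA, if_pos hc1]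
      omega
    have hlen : ((f.take i ++ ['m','a','t','h','.']) ++ f.drop i).length
        = i + 5 + (f.drop i).length := by
      rw [List.length_append, htl]
    have hld : (f.drop i).length = f.length - i := List.length_drop
    rw [hdrop, hlen, Nat.add_sub_add_left, ← hld]
    exact Nat.sub_lt (hld ▸ Nat.sub_pos_of_lt h) (Nat.lt_of_lt_of_le Nat.zero_lt_one h1)
  · exact Nat.sub_lt_sub_left h (Nat.lt_succ_self i)

def add_math (function : String) : String :=
  PySem.Str.replace (String.ofList (loopA function.toList 0)) "math.int" "int"

-- ===== PORT B =====
-- itertools.groupby(function, key=str.isalpha): maximal runs of equal key, in order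
def groupsB (s : List Char) : List (Bool × List Char) :=
  match s with
  | [] => []
  | c :: t =>
    let k := PySem.Chars.isalpha c
    (k, c :: t.takeWhile (fun d => PySem.Chars.isalpha d == k)) ::
      groupsB (t.dropWhile (fun d => PySem.Chars.isalpha d == k))
termination_by s.length
decreasing_by simp; have := List.length_dropWhile_le (fun d => PySem.Chars.isalpha d == PySem.Chars.isalpha c) t; omega

-- per-piece fix: splice 'math.' before the first non-'x' char of an alphabetic run
def fixPieceB (k : Bool) (piece : List Char) : List Char :=
  if k then
    match piece.findIdx? (fun ch => ch != 'x') with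
    | some j => piece.take j ++ ('m' :: 'a' :: 't' :: 'h' :: '.' :: []) ++ piece.drop j
    | none => piece
  else piece

def add_math_alt (function : String) : String :=
  PySem.Str.replace
    (String.ofList (((groupsB function.toList).map (fun p => fixPieceB p.1 p.2)).flatten))
    "math.int" "int"

-- ===== PRECONDITION & SPEC =====
def Spec_add_math (function : String) (out : String) : Prop := out = add_math_alt function
instance (function : String) (out : String) : Decidable (Spec_add_math function out) := by unfold Spec_add_math; infer_instance

-- ===== CLAIM (what is proved, stated in full; the proofs are below) =====
def Claim_equal_add_math : Prop := ∀ (function : String), Dom_add_math function → Spec_add_math function (add_math function)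

-- ===== LEMMAS AND PROOFS =====

-- proof-side char-wise normal form of the transformation (before the final replace)
def coreT (s : List Char) : List Char :=
  match s with
  | [] => []
  | c :: t =>
    if PySem.Chars.isalpha c && c != 'x' then
      'm' :: 'a' :: 't' :: 'h' :: '.' :: c ::
        (t.takeWhile PySem.Chars.isalpha ++ coreT (t.dropWhile PySem.Chars.isalpha))
    else c :: coreT t
termination_by s.length
decreasing_by
  · simp; have := List.length_dropWhile_le PySem.Chars.isalpha t; omega
  · simp

theorem skipAlphaA_eq (cs : List Char) :
    skipAlphaA cs = (cs.takeWhile PySem.Chars.isalpha).length := by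
  induction cs with
  | nil => rfl
  | cons c t ih =>
    rw [skipAlphaA, List.takeWhile_cons]
    by_cases hc : PySem.Chars.isalpha c = true
    · rw [if_pos hc, if_pos hc, ih]
      simp only [List.length_cons]
      omega
    · rw [if_neg hc, if_neg hc]
      rfl

theorem loopA_core (s : List Char) (p : List Char) :
    loopA (p ++ s) p.length = p ++ coreT s := by
  match s with
  | [] =>
    rw [loopA, dif_neg (by simp), coreT]
  | c :: t =>
    have hlt : p.length < (p ++ c :: t).length := by simp
    have hget : (p ++ c :: t)[p.length]'hlt = c := by
      rw [List.getElem_append_right (Nat.le_refl _)]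
      simp
    rw [loopA, dif_pos hlt]
    by_cases hc : (PySem.Chars.isalpha c && c != 'x') = true
    · rw [dif_pos (by rw [hget]; exact hc)]
      simp only [List.take_left, List.drop_left]
      have halpha : PySem.Chars.isalpha c = true := by
        simp only [Bool.and_eq_true] at hc; exact hc.1
      have hskip : p.length + 5
            + skipAlphaA (((p ++ ['m','a','t','h','.']) ++ (c :: t)).drop (p.length + 5))
          = (p ++ ['m','a','t','h','.'] ++ c :: t.takeWhile PySem.Chars.isalpha).length := by
        have h5 : p.length + 5 = (p ++ ['m','a','t','h','.']).length := by simp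
        rw [h5, List.drop_left, skipAlphaA_eq, List.takeWhile_cons, if_pos halpha]
        simp; omega
      have hsplit : (p ++ ['m','a','t','h','.']) ++ (c :: t)
          = (p ++ ['m','a','t','h','.'] ++ c :: t.takeWhile PySem.Chars.isalpha)
            ++ t.dropWhile PySem.Chars.isalpha := by
        simp [List.takeWhile_append_dropWhile]
      rw [hskip, hsplit, loopA_core (t.dropWhile PySem.Chars.isalpha)]
      rw [coreT]
      simp [hc]
    · rw [dif_neg (by rw [hget]; exact hc)]
      have h1 : p ++ c :: t = (p ++ [c]) ++ t := by simp
      have h2 : p.length + 1 = (p ++ [c]).length := by simp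
      rw [h1, h2, loopA_core t (p ++ [c]), coreT]
      simp [hc]
termination_by s.length
decreasing_by
  · have := List.length_dropWhile_le PySem.Chars.isalpha t; simp; omega
  · simp

theorem coreT_nonalpha (g : List Char) (hg : ∀ d ∈ g, PySem.Chars.isalpha d = false)
    (r : List Char) : coreT (g ++ r) = g ++ coreT r := by
  induction g with
  | nil => simp
  | cons d g' ih =>
    have hd : PySem.Chars.isalpha d = false := hg d (by simp)
    rw [List.cons_append, coreT, if_neg (by simp [hd])]
    rw [ih (fun x hx => hg x (by simp [hx]))]
    simp

theorem fixPieceB_cons_x (g : List Char) :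
    fixPieceB true ('x' :: g) = 'x' :: fixPieceB true g := by
  unfold fixPieceB
  rw [if_pos rfl, if_pos rfl, List.findIdx?_cons]
  simp only [bne_self_eq_false, Bool.false_eq_true, if_false]
  cases h : g.findIdx? (fun ch => ch != 'x') with
  | none => simp
  | some j => simp

theorem coreT_alpha (g : List Char) (hg : ∀ d ∈ g, PySem.Chars.isalpha d = true)
    (r : List Char) (hr : ∀ w : r ≠ [], PySem.Chars.isalpha (r.head w) = false) :
    coreT (g ++ r) = fixPieceB true g ++ coreT r := by
  induction g with
  | nil => simp [fixPieceB]
  | cons d g' ih =>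
    have hd : PySem.Chars.isalpha d = true := hg d (by simp)
    have hga : ∀ x ∈ g', PySem.Chars.isalpha x = true := fun x hx => hg x (by simp [hx])
    by_cases hx : d = 'x'
    · subst hx
      rw [List.cons_append, coreT]
      simp only [hd, Bool.true_and, bne_self_eq_false, Bool.false_eq_true, if_false]
      rw [ih hga, fixPieceB_cons_x]
      simp
    · rw [List.cons_append, coreT]
      have hcond : (PySem.Chars.isalpha d && d != 'x') = true := by
        simp [hd, hx]
      simp only [hcond, if_true]
      have htw : (g' ++ r).takeWhile PySem.Chars.isalpha = g' := by
        rw [List.takeWhile_append_of_pos hga]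
        cases r with
        | nil => simp
        | cons a r' =>
          have ha : PySem.Chars.isalpha a = false := by simpa using hr (by simp)
          rw [List.takeWhile_cons, if_neg (by simp [ha])]
          simp
      have hdw : (g' ++ r).dropWhile PySem.Chars.isalpha = r := by
        rw [List.dropWhile_append_of_pos hga]
        cases r with
        | nil => simp
        | cons a r' =>
          have ha : PySem.Chars.isalpha a = false := by simpa using hr (by simp)
          rw [List.dropWhile_cons, if_neg (by simp [ha])]
      rw [htw, hdw]
      have hfix : fixPieceB true (d :: g') = 'm' :: 'a' :: 't' :: 'h' :: '.' :: d :: g' := by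
        unfold fixPieceB
        rw [if_pos rfl, List.findIdx?_cons, if_pos (by simp [hx])]
        simp
      rw [hfix]
      simp

theorem groups_core (s : List Char) :
    ((groupsB s).map (fun p => fixPieceB p.1 p.2)).flatten = coreT s := by
  match s with
  | [] => rw [groupsB, coreT]; simp
  | c :: t =>
    rw [groupsB]
    simp only [List.map_cons, List.flatten_cons]
    rw [groups_core (t.dropWhile (fun d => PySem.Chars.isalpha d == PySem.Chars.isalpha c))]
    by_cases hk : PySem.Chars.isalpha c = true
    · have hpe : (fun d => PySem.Chars.isalpha d == PySem.Chars.isalpha c)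
          = (fun d => PySem.Chars.isalpha d) := by
        funext d; rw [hk]; cases PySem.Chars.isalpha d <;> simp
      rw [hpe]
      have hg2 : ∀ d ∈ c :: t.takeWhile (fun d => PySem.Chars.isalpha d),
          PySem.Chars.isalpha d = true := by
        intro d hd
        rcases List.mem_cons.mp hd with h | h
        · subst h; exact hk
        · exact List.mem_takeWhile_imp h
      have hr2 : ∀ w : t.dropWhile (fun d => PySem.Chars.isalpha d) ≠ [],
          PySem.Chars.isalpha ((t.dropWhile (fun d => PySem.Chars.isalpha d)).head w) = false := by
        intro w
        simpa using List.head_dropWhile_not (fun d => PySem.Chars.isalpha d) w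
      have hmain := coreT_alpha (c :: t.takeWhile (fun d => PySem.Chars.isalpha d)) hg2
        (t.dropWhile (fun d => PySem.Chars.isalpha d)) hr2
      rw [List.cons_append] at hmain
      conv_rhs => rw [show c :: t
          = c :: (t.takeWhile (fun d => PySem.Chars.isalpha d)
              ++ t.dropWhile (fun d => PySem.Chars.isalpha d)) from by
        rw [List.takeWhile_append_dropWhile]]
      rw [hmain, hk]
    · have hkf : PySem.Chars.isalpha c = false := by simpa using hk
      have hng : ∀ d ∈ c :: t.takeWhile (fun d => PySem.Chars.isalpha d == PySem.Chars.isalpha c),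
          PySem.Chars.isalpha d = false := by
        intro d hd
        rcases List.mem_cons.mp hd with h | h
        · subst h; exact hkf
        · have := List.mem_takeWhile_imp h
          simp [hkf] at this
          exact this
      have hmain := coreT_nonalpha
        (c :: t.takeWhile (fun d => PySem.Chars.isalpha d == PySem.Chars.isalpha c)) hng
        (t.dropWhile (fun d => PySem.Chars.isalpha d == PySem.Chars.isalpha c))
      rw [List.cons_append] at hmain
      conv_rhs => rw [show c :: t
          = c :: (t.takeWhile (fun d => PySem.Chars.isalpha d == PySem.Chars.isalpha c)
              ++ t.dropWhile (fun d => PySem.Chars.isalpha d == PySem.Chars.isalpha c)) from by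
        rw [List.takeWhile_append_dropWhile]]
      rw [hmain]
      simp [fixPieceB, hkf]
termination_by s.length
decreasing_by
  have := List.length_dropWhile_le (fun d => PySem.Chars.isalpha d == PySem.Chars.isalpha c) t
  simp; omega

-- ===== VERDICT (by name: the statement is the Claim_ definition above) =====
theorem add_math_spec : Claim_equal_add_math := by
  intro function _
  unfold Spec_add_math add_math add_math_alt
  rw [groups_core]
  have := loopA_core function.toList []
  simp at this
  rw [this]
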